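-- pv_equiv track=rewrite | github.com/sbr0nch/SentriKat | app/models.py | normalize_os_name
-- ===== SOURCE A (Python) =====
-- def normalize_os_name(os_name):
--     """
--     Normalize OS name to a standard platform category.
--     Used for filtering and display consistency.
--     """
--     if not os_name:
--         return None
--
--     os_lower = os_name.lower()
--
--     # Windows variants
--     if 'windows' in os_lower or 'win32' in os_lower or 'win64' in os_lower:
--         return 'windows'
--
--     # Linux variants
--     if any(x in os_lower for x in ['linux', 'ubuntu', 'debian', 'centos', 'rhel',
--                                     'red hat', 'fedora', 'alpine', 'arch', 'suse']):
--         return 'linux'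
--
--     # macOS variants
--     if any(x in os_lower for x in ['macos', 'mac os', 'darwin', 'osx']):
--         return 'macos'
--
--     # BSD variants
--     if 'bsd' in os_lower:
--         return 'bsd'
--
--     # Unix generic
--     if 'unix' in os_lower or 'sunos' in os_lower or 'solaris' in os_lower:
--         return 'unix'
--
--     # Container/virtualization
--     if 'docker' in os_lower or 'container' in os_lower:
--         return 'container'
--
--     return 'other'
-- ===== SOURCE B (Python) =====
-- # Flat keyword->category map scanned once with an argmin accumulator:
-- # keep the best (lowest-priority-number) category seen so far; no early
-- # return and no per-category grouping.  Correct because A returns the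
-- # first category (in priority order) with any matching keyword, which is
-- # exactly the minimum-priority matched category, or 'other' if none match.
-- KEYWORD_CATEGORY = {
--     'windows': 'windows', 'win32': 'windows', 'win64': 'windows',
--     'linux': 'linux', 'ubuntu': 'linux', 'debian': 'linux', 'centos': 'linux',
--     'rhel': 'linux', 'red hat': 'linux', 'fedora': 'linux', 'alpine': 'linux',
--     'arch': 'linux', 'suse': 'linux',
--     'macos': 'macos', 'mac os': 'macos', 'darwin': 'macos', 'osx': 'macos',
--     'bsd': 'bsd',
--     'unix': 'unix', 'sunos': 'unix', 'solaris': 'unix',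
--     'docker': 'container', 'container': 'container',
-- }
--
-- PRIORITY = {'windows': 0, 'linux': 1, 'macos': 2, 'bsd': 3, 'unix': 4,
--             'container': 5}
--
--
-- def normalize_os_name(os_name):
--     if not os_name:
--         return None
--     os_lower = os_name.lower()
--     best = None
--     for kw, cat in KEYWORD_CATEGORY.items():
--         if kw in os_lower and (best is None or PRIORITY[cat] < PRIORITY[best]):
--             best = cat
--     return best if best is not None else 'other'
-- ===== Notes on version B (the rewrite author's own statement) =====
-- stated objective: alternative
-- what changed: Replaces A's six early-return if-branches by a single full pass over a flat keyword-to-category map keeping an argmin-by-priority accumulator, returning the best matched category at the end.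
import Mathlib
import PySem

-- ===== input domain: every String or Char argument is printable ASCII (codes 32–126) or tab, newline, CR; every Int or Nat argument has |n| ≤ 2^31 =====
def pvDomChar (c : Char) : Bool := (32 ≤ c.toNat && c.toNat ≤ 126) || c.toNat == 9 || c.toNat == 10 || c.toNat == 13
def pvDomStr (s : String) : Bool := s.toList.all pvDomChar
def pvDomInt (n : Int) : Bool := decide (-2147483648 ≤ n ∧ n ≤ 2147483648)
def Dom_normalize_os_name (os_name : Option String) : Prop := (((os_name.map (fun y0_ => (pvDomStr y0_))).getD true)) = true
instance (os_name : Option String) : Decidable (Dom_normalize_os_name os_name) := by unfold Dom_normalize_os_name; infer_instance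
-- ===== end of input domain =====

-- B replaces A's six early-return branches by one full pass over a flat keyword→category map
-- with an argmin-by-priority accumulator (alternative decomposition; same cost).

-- ===== PORT A =====
def normalize_os_name (os_name : Option String) : Option String :=
  match os_name with
  | none => none
  | some s =>
    if s = "" then none
    else
      let os_lower := PySem.Str.lower s
      if PySem.Str.isIn "windows" os_lower || PySem.Str.isIn "win32" os_lower || PySem.Str.isIn "win64" os_lower then
        some "windows"
      else if (["linux", "ubuntu", "debian", "centos", "rhel",
                "red hat", "fedora", "alpine", "arch", "suse"].any
                 (fun x => PySem.Str.isIn x os_lower)) then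
        some "linux"
      else if (["macos", "mac os", "darwin", "osx"].any
                 (fun x => PySem.Str.isIn x os_lower)) then
        some "macos"
      else if PySem.Str.isIn "bsd" os_lower then
        some "bsd"
      else if PySem.Str.isIn "unix" os_lower || PySem.Str.isIn "sunos" os_lower || PySem.Str.isIn "solaris" os_lower then
        some "unix"
      else if PySem.Str.isIn "docker" os_lower || PySem.Str.isIn "container" os_lower then
        some "container"
      else
        some "other"

-- ===== PORT B =====
def pvKeywordCategory : PySem.Dict String String := PySem.Dict.ofList
  [("windows", "windows"), ("win32", "windows"), ("win64", "windows"),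
   ("linux", "linux"), ("ubuntu", "linux"), ("debian", "linux"), ("centos", "linux"),
   ("rhel", "linux"), ("red hat", "linux"), ("fedora", "linux"), ("alpine", "linux"),
   ("arch", "linux"), ("suse", "linux"),
   ("macos", "macos"), ("mac os", "macos"), ("darwin", "macos"), ("osx", "macos"),
   ("bsd", "bsd"),
   ("unix", "unix"), ("sunos", "unix"), ("solaris", "unix"),
   ("docker", "container"), ("container", "container")]

def pvPriority : PySem.Dict String Int := PySem.Dict.ofList
  [("windows", 0), ("linux", 1), ("macos", 2), ("bsd", 3), ("unix", 4), ("container", 5)]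

-- PRIORITY[c]: every category looked up is a key of pvPriority, so the default is never hit
def pvPr (c : String) : Int := PySem.Dict.getD pvPriority c 0

-- "best is None or PRIORITY[cat] < PRIORITY[best]"
def pvBetter (cat : String) : Option String → Bool
  | none => true
  | some b => decide (pvPr cat < pvPr b)

-- loop body of Source B: `if kw in os_lower and (best is None or PRIORITY[cat] < PRIORITY[best]): best = cat`
def pvStep (os_lower : String) (best : Option String) (p : String × String) : Option String :=
  if PySem.Str.isIn p.1 os_lower && pvBetter p.2 best then some p.2 else best

def normalize_os_name_alt (os_name : Option String) : Option String :=
  match os_name with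
  | none => none
  | some s =>
    if s = "" then none
    else
      let os_lower := PySem.Str.lower s
      let best := (PySem.Dict.items pvKeywordCategory).foldl (pvStep os_lower) none
      some (best.getD "other")

-- ===== PRECONDITION & SPEC =====
def Spec_normalize_os_name (os_name : Option String) (out : Option String) : Prop := out = normalize_os_name_alt os_name
instance (os_name : Option String) (out : Option String) : Decidable (Spec_normalize_os_name os_name out) := by unfold Spec_normalize_os_name; infer_instance

-- ===== CLAIM (what is proved, stated in full; the proofs are below) =====
def Claim_equal_normalize_os_name : Prop := ∀ (os_name : Option String), Dom_normalize_os_name os_name → Spec_normalize_os_name os_name (normalize_os_name os_name)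

-- ===== LEMMAS AND PROOFS =====

@[simp] theorem pvBetter_none (c : String) : pvBetter c none = true := rfl
@[simp] theorem pvBetter_self (c : String) : pvBetter c (some c) = false := by
  simp [pvBetter]

-- folding a run of keywords that all map to the same category c
theorem pvGroup (os c : String) (kws : List String) (acc : Option String) :
    (kws.map (fun k => (k, c))).foldl (pvStep os) acc =
      if pvBetter c acc && kws.any (fun k => PySem.Str.isIn k os) then some c else acc := by
  induction kws generalizing acc with
  | nil => simp
  | cons k kws ih =>
    simp only [List.map_cons, List.foldl_cons, List.any_cons, pvStep]
    by_cases h1 : PySem.Str.isIn k os = true <;>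
      by_cases h2 : pvBetter c acc = true <;>
        simp [h2, ih, Bool.eq_false_iff.mpr] <;> simp_all

theorem pvItems_eq :
    PySem.Dict.items pvKeywordCategory =
      (["windows", "win32", "win64"].map (fun k => (k, "windows"))) ++
      (["linux", "ubuntu", "debian", "centos", "rhel", "red hat", "fedora", "alpine",
        "arch", "suse"].map (fun k => (k, "linux"))) ++
      (["macos", "mac os", "darwin", "osx"].map (fun k => (k, "macos"))) ++
      (["bsd"].map (fun k => (k, "bsd"))) ++
      (["unix", "sunos", "solaris"].map (fun k => (k, "unix"))) ++
      (["docker", "container"].map (fun k => (k, "container"))) := by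
  decide

@[simp] theorem pvBetter_win_lin : pvBetter "linux" (some "windows") = false := by decide
@[simp] theorem pvBetter_win_mac : pvBetter "macos" (some "windows") = false := by decide
@[simp] theorem pvBetter_win_bsd : pvBetter "bsd" (some "windows") = false := by decide
@[simp] theorem pvBetter_win_unx : pvBetter "unix" (some "windows") = false := by decide
@[simp] theorem pvBetter_win_con : pvBetter "container" (some "windows") = false := by decide
@[simp] theorem pvBetter_lin_mac : pvBetter "macos" (some "linux") = false := by decide
@[simp] theorem pvBetter_lin_bsd : pvBetter "bsd" (some "linux") = false := by decide
@[simp] theorem pvBetter_lin_unx : pvBetter "unix" (some "linux") = false := by decide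
@[simp] theorem pvBetter_lin_con : pvBetter "container" (some "linux") = false := by decide
@[simp] theorem pvBetter_mac_bsd : pvBetter "bsd" (some "macos") = false := by decide
@[simp] theorem pvBetter_mac_unx : pvBetter "unix" (some "macos") = false := by decide
@[simp] theorem pvBetter_mac_con : pvBetter "container" (some "macos") = false := by decide
@[simp] theorem pvBetter_bsd_unx : pvBetter "unix" (some "bsd") = false := by decide
@[simp] theorem pvBetter_bsd_con : pvBetter "container" (some "bsd") = false := by decide
@[simp] theorem pvBetter_unx_con : pvBetter "container" (some "unix") = false := by decide

-- ===== VERDICT (by name: the statement is the Claim_ definition above) =====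
set_option maxHeartbeats 1000000 in
theorem normalize_os_name_spec : Claim_equal_normalize_os_name := by
  intro os_name hdom
  clear hdom
  unfold Spec_normalize_os_name normalize_os_name normalize_os_name_alt
  cases os_name with
  | none => rfl
  | some s =>
    by_cases hs : s = ""
    · simp [hs]
    · simp only [hs, if_false]
      rw [pvItems_eq]
      simp only [List.foldl_append, pvGroup, List.any_cons, List.any_nil, Bool.or_false, Bool.or_assoc]
      set os := PySem.Str.lower s with hos
      cases c1 : (PySem.Str.isIn "windows" os || (PySem.Str.isIn "win32" os || PySem.Str.isIn "win64" os)) <;>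
      cases c2 : (PySem.Str.isIn "linux" os || (PySem.Str.isIn "ubuntu" os || (PySem.Str.isIn "debian" os || (PySem.Str.isIn "centos" os || (PySem.Str.isIn "rhel" os || (PySem.Str.isIn "red hat" os || (PySem.Str.isIn "fedora" os || (PySem.Str.isIn "alpine" os || (PySem.Str.isIn "arch" os || PySem.Str.isIn "suse" os))))))))) <;>
      cases c3 : (PySem.Str.isIn "macos" os || (PySem.Str.isIn "mac os" os || (PySem.Str.isIn "darwin" os || PySem.Str.isIn "osx" os))) <;>
      cases c4 : (PySem.Str.isIn "bsd" os) <;>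
      cases c5 : (PySem.Str.isIn "unix" os || (PySem.Str.isIn "sunos" os || PySem.Str.isIn "solaris" os)) <;>
      cases c6 : (PySem.Str.isIn "docker" os || PySem.Str.isIn "container" os) <;>
      simp only [c1, c2, c3, c4, c5, c6, if_true, if_false, Bool.true_and, Bool.false_and,
                 Bool.and_true, Bool.and_false, pvBetter_none, pvBetter_win_lin, pvBetter_win_mac,
                 pvBetter_win_bsd, pvBetter_win_unx, pvBetter_win_con, pvBetter_lin_mac,
                 pvBetter_lin_bsd, pvBetter_lin_unx, pvBetter_lin_con, pvBetter_mac_bsd,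
                 pvBetter_mac_unx, pvBetter_mac_con, pvBetter_bsd_unx, pvBetter_bsd_con,
                 pvBetter_unx_con, Option.getD_some, Option.getD_none, Bool.false_eq_true,
                 Bool.true_eq_false, if_neg, if_pos, ite_true, ite_false]
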